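-- pv_equiv track=rewrite | github.com/hamcheeseburger/coding | baekjoon/5.py | solution
-- ===== SOURCE A (Python) =====
-- def getNext(num, size):
--     if num == size - 1:
--         return 0
--     return num + 1
--
-- def checkZero(answer):
--     for line in answer:
--         if 0 in line:
--             return True
--
--     return False
--
-- def solution(rows, columns):
--     answer = [[0] * columns for _ in range(rows)]
--
--     cnt = 1
--     row = 0
--     col = 0
--     answer[0][0] = 1
--     going = True
--
--     while going:
--         if cnt % 2 == 0:
--             # row 값 증가
--             row = getNext(row, rows)
--         else:
--             # col 값 증가
--             col = getNext(col, columns)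
--         cnt += 1
--         answer[row][col] = cnt
--
--         # row, col 크기가 다른 경우, 매번 0이 남았는지 확인해야 함
--         if rows != columns:
--             going = checkZero(answer)
--         # row, col 크기가 같은 경우, 패턴이 반복되지 않게 종료(cnt가 row, col의 두배가 되는 순간 종료)
--         elif cnt == rows * 2:
--             going = False
--
--     return answer
-- ===== SOURCE B (Python) =====
-- def solution(rows, columns):
--     answer = [[0] * columns for _ in range(rows)]
--     answer[0][0] = 1
--     cnt = 1
--     row = 0
--     col = 0
--     if rows != columns:
--         # keep a running count of zero cells instead of rescanning the grid
--         zeros = rows * columns - 1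
--         while zeros > 0:
--             if cnt % 2 == 0:
--                 row = 0 if row == rows - 1 else row + 1
--             else:
--                 col = 0 if col == columns - 1 else col + 1
--             cnt += 1
--             if answer[row][col] == 0:
--                 zeros -= 1
--             answer[row][col] = cnt
--     else:
--         while cnt < rows * 2:
--             if cnt % 2 == 0:
--                 row = 0 if row == rows - 1 else row + 1
--             else:
--                 col = 0 if col == columns - 1 else col + 1
--             cnt += 1
--             answer[row][col] = cnt
--     return answer
-- ===== Notes on version B (the rewrite author's own statement) =====
-- stated objective: faster
-- what changed: B maintains a running count of remaining zero cells (decremented when a zero cell is overwritten) instead of rescanning the whole grid with checkZero after every step, and splits the equal/unequal cases into two plain loops.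
import Mathlib
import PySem

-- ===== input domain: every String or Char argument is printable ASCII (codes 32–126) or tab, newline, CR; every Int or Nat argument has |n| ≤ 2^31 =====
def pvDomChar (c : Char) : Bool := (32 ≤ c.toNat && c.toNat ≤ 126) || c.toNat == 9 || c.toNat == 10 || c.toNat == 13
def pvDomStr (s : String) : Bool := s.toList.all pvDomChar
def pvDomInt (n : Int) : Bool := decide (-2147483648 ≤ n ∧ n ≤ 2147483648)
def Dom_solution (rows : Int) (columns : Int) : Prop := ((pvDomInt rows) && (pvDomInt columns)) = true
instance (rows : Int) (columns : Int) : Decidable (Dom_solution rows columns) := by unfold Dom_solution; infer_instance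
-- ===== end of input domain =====

-- B replaces A's full-grid rescan (checkZero) after every write by a running count of
-- remaining zero cells, decremented exactly when a zero cell is overwritten.

-- `answer[row][col] = v` for the in-range non-negative indices this program uses (exact there)
def set2 (g : List (List Int)) (r c : Int) (v : Int) : List (List Int) :=
  g.set r.toNat ((g.getD r.toNat []).set c.toNat v)

-- ===== PORT A =====
def getNextA (num : Int) (size : Int) : Int :=
  if num = size - 1 then 0 else num + 1

-- `for line in answer: if 0 in line: return True` / `return False`
def checkZeroA (answer : List (List Int)) : Bool :=
  answer.any (fun line => line.contains 0)

def pyFuelA (rows : Int) (columns : Int) : Nat := (2 * rows * columns).toNat + 4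

-- the `while going:` loop, fueled (fuel is ample for every input Pre_ admits)
def loopA (rows columns : Int) : Nat → List (List Int) → Int → Int → Int → Bool → List (List Int)
  | 0, answer, _, _, _, _ => answer
  | fuel + 1, answer, cnt, row, col, going =>
    if going then
      let row' := if PySem.Int.mod cnt 2 = 0 then getNextA row rows else row
      let col' := if PySem.Int.mod cnt 2 = 0 then col else getNextA col columns
      let cnt' := cnt + 1
      let answer' := set2 answer row' col' cnt'
      let going' := if rows ≠ columns then checkZeroA answer'
                    else if cnt' = rows * 2 then false else going
      loopA rows columns fuel answer' cnt' row' col' going'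
    else answer

def solution (rows : Int) (columns : Int) : List (List Int) :=
  let answer := List.replicate rows.toNat (List.replicate columns.toNat 0)
  let answer := set2 answer 0 0 1
  loopA rows columns (pyFuelA rows columns) answer 1 0 0 true

-- ===== PORT B =====
def pyFuelB (rows : Int) (columns : Int) : Nat := (2 * rows * columns).toNat + 4

-- `while zeros > 0:` loop of Source B (rows ≠ columns case), fueled
def loopBne (rows columns : Int) : Nat → List (List Int) → Int → Int → Int → Int → List (List Int)
  | 0, answer, _, _, _, _ => answer
  | fuel + 1, answer, cnt, row, col, zeros =>
    if 0 < zeros then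
      let row' := if PySem.Int.mod cnt 2 = 0 then (if row = rows - 1 then 0 else row + 1) else row
      let col' := if PySem.Int.mod cnt 2 = 0 then col else (if col = columns - 1 then 0 else col + 1)
      let cnt' := cnt + 1
      let zeros' := if (answer.getD row'.toNat []).getD col'.toNat 0 = 0 then zeros - 1 else zeros
      loopBne rows columns fuel (set2 answer row' col' cnt') cnt' row' col' zeros'
    else answer

-- `while cnt < rows * 2:` loop of Source B (rows = columns case), fueled
def loopBeq (rows columns : Int) : Nat → List (List Int) → Int → Int → Int → List (List Int)
  | 0, answer, _, _, _ => answer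
  | fuel + 1, answer, cnt, row, col =>
    if cnt < rows * 2 then
      let row' := if PySem.Int.mod cnt 2 = 0 then (if row = rows - 1 then 0 else row + 1) else row
      let col' := if PySem.Int.mod cnt 2 = 0 then col else (if col = columns - 1 then 0 else col + 1)
      let cnt' := cnt + 1
      loopBeq rows columns fuel (set2 answer row' col' cnt') cnt' row' col'
    else answer

def solution_alt (rows : Int) (columns : Int) : List (List Int) :=
  let answer := set2 (List.replicate rows.toNat (List.replicate columns.toNat 0)) 0 0 1
  if rows ≠ columns then
    loopBne rows columns (pyFuelB rows columns) answer 1 0 0 (rows * columns - 1)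
  else
    loopBeq rows columns (pyFuelB rows columns) answer 1 0 0

-- ===== PRECONDITION & SPEC =====
-- rows < 1 or columns < 1 makes A raise IndexError at answer[0][0]; when rows ≠ columns and
-- gcd(rows, columns) ≥ 3 the walk can never reach every cell, so A's while loop never ends.
def Pre_solution (rows : Int) (columns : Int) : Prop :=
  1 ≤ rows ∧ 1 ≤ columns ∧ (rows = columns ∨ Int.gcd rows columns ≤ 2)
instance (rows : Int) (columns : Int) : Decidable (Pre_solution rows columns) := by
  unfold Pre_solution; infer_instance

def pvWitness_solution : Int × Int := (2, 3)

def Spec_solution (rows : Int) (columns : Int) (out : List (List Int)) : Prop := out = solution_alt rows columns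
instance (rows : Int) (columns : Int) (out : List (List Int)) : Decidable (Spec_solution rows columns out) := by unfold Spec_solution; infer_instance

-- ===== CLAIM (what is proved, stated in full; the proofs are below) =====
def Claim_equal_solution : Prop := ∀ (rows : Int) (columns : Int), Dom_solution rows columns → Pre_solution rows columns → Spec_solution rows columns (solution rows columns)

-- ===== LEMMAS AND PROOFS =====

-- number of zero cells in the grid
def countZ (g : List (List Int)) : Nat := (g.map (fun l => l.count 0)).sum

lemma count_set_int (l : List Int) (c : Nat) (v : Int) (hv : v ≠ 0) (hc : c < l.length) :
    (((l.set c v).count 0 : Nat) : Int) = (l.count 0 : Int) - (if l.getD c 0 = 0 then 1 else 0) := by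
  induction l generalizing c with
  | nil => simp at hc
  | cons h t ih =>
    cases c with
    | zero =>
      simp only [List.set, List.count_cons, List.getD_cons_zero]
      split_ifs <;> simp_all
    | succ c =>
      simp only [List.set, List.count_cons, List.getD_cons_succ]
      have := ih c (by simpa using hc)
      split_ifs at this ⊢ <;> push_cast at this ⊢ <;> omega

lemma countZ_setRow (g : List (List Int)) (r : Nat) (l' : List Int) (hr : r < g.length) :
    ((countZ (g.set r l') : Nat) : Int)
      = (countZ g : Int) - ((g.getD r []).count 0 : Int) + (l'.count 0 : Int) := by
  induction g generalizing r with
  | nil => simp at hr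
  | cons h t ih =>
    cases r with
    | zero => simp [countZ]; ring
    | succ r =>
      simp only [List.set, countZ, List.map_cons, List.sum_cons, List.getD_cons_succ]
      have := ih r (by simpa using hr)
      simp only [countZ] at this
      push_cast at this ⊢
      omega

lemma countZ_set2 (g : List (List Int)) (row col v : Int) (hv : v ≠ 0)
    (hrow : row.toNat < g.length) (hcol : col.toNat < (g.getD row.toNat []).length) :
    ((countZ (set2 g row col v) : Nat) : Int)
      = (countZ g : Int) - (if (g.getD row.toNat []).getD col.toNat 0 = 0 then 1 else 0) := by
  unfold set2
  rw [countZ_setRow _ _ _ hrow, count_set_int _ _ _ hv hcol]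
  ring

lemma checkZero_iff (g : List (List Int)) : checkZeroA g = true ↔ 0 < countZ g := by
  simp only [checkZeroA, countZ, List.any_eq_true, List.contains_iff_mem]
  rw [Nat.pos_iff_ne_zero, Ne, List.sum_eq_zero_iff]
  constructor
  · rintro ⟨l, hl, h0⟩ hall
    have := hall (l.count 0) (List.mem_map_of_mem hl)
    rw [List.count_eq_zero] at this
    exact this h0
  · intro h
    by_contra hno
    rw [not_exists] at hno
    exact h (fun x hx => by
      obtain ⟨l, hl, rfl⟩ := List.mem_map.1 hx
      rw [List.count_eq_zero]
      exact fun hm => hno l ⟨hl, hm⟩)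

lemma loopA_false (rows columns : Int) (fuel : Nat) (answer : List (List Int)) (cnt row col : Int) :
    loopA rows columns fuel answer cnt row col false = answer := by
  cases fuel <;> simp [loopA]

lemma loopBeq_done (rows columns : Int) (fuel : Nat) (answer : List (List Int)) (cnt row col : Int)
    (h : ¬ cnt < rows * 2) : loopBeq rows columns fuel answer cnt row col = answer := by
  cases fuel <;> simp [loopBeq, h]

lemma loop_eq (rows : Int) (fuel : Nat) :
    ∀ (answer : List (List Int)) (cnt row col : Int), cnt < rows * 2 →
    loopA rows rows fuel answer cnt row col true = loopBeq rows rows fuel answer cnt row col := by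
  induction fuel with
  | zero => intro answer cnt row col hcnt; simp [loopA, loopBeq]
  | succ fuel ih =>
    intro answer cnt row col hcnt
    simp only [loopA, loopBeq, getNextA, if_pos hcnt, if_true, ne_eq, not_true_eq_false,
      if_false]
    by_cases hstop : cnt + 1 = rows * 2
    · rw [if_pos hstop, loopA_false, loopBeq_done]
      omega
    · rw [if_neg hstop, ih]
      omega

lemma loopBne_done (rows columns : Int) (fuel : Nat) (answer : List (List Int))
    (cnt row col zeros : Int) (h : ¬ 0 < zeros) :
    loopBne rows columns fuel answer cnt row col zeros = answer := by
  cases fuel <;> simp [loopBne, h]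

lemma loop_ne (rows columns : Int) (hr : 1 ≤ rows) (hc : 1 ≤ columns) (hne : rows ≠ columns)
    (fuel : Nat) :
    ∀ (answer : List (List Int)) (cnt row col : Int),
      answer.length = rows.toNat →
      (∀ l ∈ answer, l.length = columns.toNat) →
      0 ≤ row → row < rows → 0 ≤ col → col < columns → 1 ≤ cnt →
      loopA rows columns fuel answer cnt row col (checkZeroA answer)
        = loopBne rows columns fuel answer cnt row col ((countZ answer : Nat) : Int) := by
  induction fuel with
  | zero => intro answer cnt row col _ _ _ _ _ _ _; simp [loopA, loopBne]
  | succ fuel ih =>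
    intro answer cnt row col hlen hrows hr0 hr1 hc0 hc1 hcnt
    by_cases hz : 0 < countZ answer
    · rw [(checkZero_iff answer).2 hz]
      have hzI : (0 : Int) < ((countZ answer : Nat) : Int) := by exact_mod_cast hz
      simp only [loopA, loopBne, getNextA, if_pos hzI, if_true, if_pos hne]
      set row' := if PySem.Int.mod cnt 2 = 0 then (if row = rows - 1 then 0 else row + 1) else row
        with hrow'
      set col' := if PySem.Int.mod cnt 2 = 0 then col else (if col = columns - 1 then 0 else col + 1)
        with hcol'
      have hrb : 0 ≤ row' ∧ row' < rows := by rw [hrow']; split_ifs <;> omega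
      have hcb : 0 ≤ col' ∧ col' < columns := by rw [hcol']; split_ifs <;> omega
      have hrn : row'.toNat < answer.length := by rw [hlen]; omega
      have hmem : answer.getD row'.toNat [] ∈ answer := by
        rw [List.getD_eq_getElem answer [] hrn]; exact List.getElem_mem hrn
      have hcn : col'.toNat < (answer.getD row'.toNat []).length := by
        rw [hrows _ hmem]; omega
      have hcz := countZ_set2 answer row' col' (cnt + 1) (by omega) hrn hcn
      rw [show (if (answer.getD row'.toNat []).getD col'.toNat 0 = 0
            then ((countZ answer : Nat) : Int) - 1 else ((countZ answer : Nat) : Int))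
          = ((countZ (set2 answer row' col' (cnt + 1)) : Nat) : Int) by
        rw [hcz]; split_ifs <;> ring]
      exact ih (set2 answer row' col' (cnt + 1)) (cnt + 1) row' col'
        (by simp [set2, hlen])
        (by
          intro l hl
          rcases List.mem_or_eq_of_mem_set hl with h | h
          · exact hrows _ h
          · rw [h, List.length_set]; exact hrows _ hmem)
        hrb.1 hrb.2 hcb.1 hcb.2 (by omega)
    · have hch : checkZeroA answer = false := by
        by_contra hb
        exact hz ((checkZero_iff answer).1 (by simpa using hb))
      have hz0 : ¬ (0 : Int) < ((countZ answer : Nat) : Int) := by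
        simp only [not_lt]; exact_mod_cast Nat.le_of_not_lt hz
      rw [hch, loopA_false, loopBne_done _ _ _ _ _ _ _ _ hz0]

lemma countZ_init (r c : Nat) :
    countZ (List.replicate r (List.replicate c (0 : Int))) = r * c := by
  simp [countZ, List.map_replicate, List.sum_replicate, smul_eq_mul]

-- ===== VERDICT (by name: the statement is the Claim_ definition above) =====
theorem solution_spec : Claim_equal_solution := by
  intro rows columns _ hpre
  obtain ⟨hr, hc, _⟩ := hpre
  unfold Spec_solution solution solution_alt
  by_cases h : rows = columns
  · subst h
    rw [if_neg (by simp)]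
    exact loop_eq rows (pyFuelA rows rows) _ 1 0 0 (by omega)
  · rw [if_pos h]
    have hrc2 : 2 ≤ rows * columns := by
      rcases lt_or_ge rows 2 with h2 | h2
      · have : rows = 1 := by omega
        subst this
        have : 2 ≤ columns := by omega
        omega
      · nlinarith
    have hrn : (0 : Nat) < (List.replicate rows.toNat (List.replicate columns.toNat (0:Int))).length := by
      simp; omega
    have hget : (List.replicate rows.toNat (List.replicate columns.toNat (0:Int))).getD 0 []
        = List.replicate columns.toNat (0:Int) := by
      rw [List.getD_eq_getElem _ [] hrn, List.getElem_replicate]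
    have hcn : (0 : Nat) < ((List.replicate rows.toNat (List.replicate columns.toNat (0:Int))).getD 0 []).length := by
      rw [hget]; simp; omega
    have hcz := countZ_set2 (List.replicate rows.toNat (List.replicate columns.toNat (0:Int)))
      0 0 1 one_ne_zero hrn hcn
    simp only [Int.toNat_zero] at hcz
    simp only [hget] at hcz
    have hold : (List.replicate columns.toNat (0:Int)).getD 0 0 = 0 := by
      rw [List.getD_eq_getElem _ 0 (by simp; omega), List.getElem_replicate]
    rw [hold, if_pos rfl, countZ_init] at hcz
    have hzval : ((countZ (set2 (List.replicate rows.toNat (List.replicate columns.toNat (0:Int))) 0 0 1) : Nat) : Int)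
        = rows * columns - 1 := by
      rw [hcz]
      have h1 : ((rows.toNat * columns.toNat : Nat) : Int) = rows * columns := by
        push_cast
        rw [Int.toNat_of_nonneg (by omega), Int.toNat_of_nonneg (by omega)]
      omega
    have hck : checkZeroA (set2 (List.replicate rows.toNat (List.replicate columns.toNat (0:Int))) 0 0 1) = true := by
      rw [checkZero_iff]
      have h2 : (0 : Int) < ((countZ (set2 (List.replicate rows.toNat (List.replicate columns.toNat (0:Int))) 0 0 1) : Nat) : Int) := by
        rw [hzval]; omega
      exact_mod_cast h2
    have hlen1 : (set2 (List.replicate rows.toNat (List.replicate columns.toNat (0:Int))) 0 0 1).length = rows.toNat := by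
      simp [set2]
    have hsh1 : ∀ l ∈ set2 (List.replicate rows.toNat (List.replicate columns.toNat (0:Int))) 0 0 1,
        l.length = columns.toNat := by
      intro l hl
      simp only [set2] at hl
      rcases List.mem_or_eq_of_mem_set hl with hm | hm
      · rw [List.eq_of_mem_replicate hm]; simp
      · rw [hm, List.length_set]
        simp only [Int.toNat_zero]
        rw [hget]; simp
    rw [← hzval, ← hck]
    exact loop_ne rows columns hr hc h (pyFuelA rows columns)
      (set2 (List.replicate rows.toNat (List.replicate columns.toNat (0:Int))) 0 0 1)
      1 0 0 hlen1 hsh1 le_rfl hr le_rfl hc le_rfl
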